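-- pv_equiv track=rewrite | github.com/mshtelma/databricks-deep-research-agent | src/services/citation/pipeline.py | _needs_hedging
-- ===== SOURCE A (Python) =====
-- def _needs_hedging(text: str) -> bool:
--     """Check if text already has hedging language.
--
--     Args:
--         text: Text to check.
--
--     Returns:
--         True if text needs hedging (doesn't already have it).
--     """
--     existing_hedges = [
--         "it appears", "it seems", "may have", "might be",
--         "reportedly", "allegedly", "according to", "suggests that",
--         "it has been suggested", "some sources indicate", "available information",
--         "unverified", "uncertain", "possibly", "potentially",
--     ]
--     lower = text.lower()
--     return not any(hedge in lower for hedge in existing_hedges)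
-- ===== SOURCE B (Python) =====
-- def _needs_hedging(text: str) -> bool:
--     """Single left-to-right scan: at each position of the lowercased text,
--     test whether any hedge phrase starts there (one pass over positions
--     instead of one substring search per phrase)."""
--     hedges = (
--         "it appears", "it seems", "may have", "might be",
--         "reportedly", "allegedly", "according to", "suggests that",
--         "it has been suggested", "some sources indicate", "available information",
--         "unverified", "uncertain", "possibly", "potentially",
--     )
--     lower = text.lower()
--     for i in range(len(lower) + 1):
--         if lower.startswith(hedges, i):
--             return False
--     return True
-- ===== Notes on version B (the rewrite author's own statement) =====
-- stated objective: alternative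
-- what changed: Replaced the per-phrase substring searches (one 'hedge in lower' scan per hedge) by a single left-to-right scan over the lowercased text that tests at each position whether any hedge phrase starts there, via str.startswith with a tuple of phrases.
import Mathlib
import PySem

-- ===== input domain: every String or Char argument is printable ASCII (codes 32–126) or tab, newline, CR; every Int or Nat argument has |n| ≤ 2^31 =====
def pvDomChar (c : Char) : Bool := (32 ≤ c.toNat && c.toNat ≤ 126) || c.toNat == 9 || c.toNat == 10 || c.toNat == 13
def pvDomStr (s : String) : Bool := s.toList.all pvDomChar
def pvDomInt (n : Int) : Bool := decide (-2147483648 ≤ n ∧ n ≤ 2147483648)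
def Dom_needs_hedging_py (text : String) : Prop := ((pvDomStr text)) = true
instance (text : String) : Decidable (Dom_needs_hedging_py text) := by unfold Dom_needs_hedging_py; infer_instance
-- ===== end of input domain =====

-- B replaces the per-phrase substring searches by one left-to-right scan over the
-- lowercased text, testing at each position whether any hedge phrase starts there
-- (objective: alternative single-pass formulation; same result on all inputs).


-- ===== PORT A =====
def pvHedgesA : List String :=
  ["it appears", "it seems", "may have", "might be",
   "reportedly", "allegedly", "according to", "suggests that",
   "it has been suggested", "some sources indicate", "available information",
   "unverified", "uncertain", "possibly", "potentially"]

def needs_hedging_py (text : String) : Bool :=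
  let lower := PySem.Str.lower text
  ! (pvHedgesA.any (fun hedge => PySem.Str.isIn hedge lower))

-- ===== PORT B =====
def pvHedgesB : List String :=
  ["it appears", "it seems", "may have", "might be",
   "reportedly", "allegedly", "according to", "suggests that",
   "it has been suggested", "some sources indicate", "available information",
   "unverified", "uncertain", "possibly", "potentially"]

-- the loop 'for i in range(len(lower)+1): if lower.startswith(hedges, i): return False'
-- as a structural scan over the suffixes of the lowercased character list
def pvScan : List Char → Bool
  | [] => if pvHedgesB.any (fun h => PySem.Chars.startswith [] h.toList) then false else true
  | c :: t =>
      if pvHedgesB.any (fun h => PySem.Chars.startswith (c :: t) h.toList) then false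
      else pvScan t

def needs_hedging_py_alt (text : String) : Bool :=
  pvScan (PySem.Str.lower text).toList

-- ===== PRECONDITION & SPEC =====
def Spec_needs_hedging_py (text : String) (out : Bool) : Prop := out = needs_hedging_py_alt text
instance (text : String) (out : Bool) : Decidable (Spec_needs_hedging_py text out) := by unfold Spec_needs_hedging_py; infer_instance

-- ===== CLAIM (what is proved, stated in full; the proofs are below) =====
def Claim_equal_needs_hedging_py : Prop := ∀ (text : String), Dom_needs_hedging_py text → Spec_needs_hedging_py text (needs_hedging_py text)

-- ===== LEMMAS AND PROOFS =====

-- a substring occurs in c :: t iff it starts there or occurs in t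
lemma pvIsIn_cons (h : String) (c : Char) (t : List Char) :
    PySem.Chars.isIn h.toList (c :: t)
      = (PySem.Chars.startswith (c :: t) h.toList || PySem.Chars.isIn h.toList t) := by
  rw [Bool.eq_iff_iff]
  simp [PySem.Chars.isIn_iff_infix, PySem.Chars.startswith_iff, List.infix_cons_iff]

-- the single scan computes the negated 'any phrase occurs' membership test
lemma pvScan_eq (cs : List Char) :
    pvScan cs = ! (pvHedgesB.any (fun h => PySem.Chars.isIn h.toList cs)) := by
  induction cs with
  | nil => decide
  | cons c t ih =>
      rw [pvScan]
      by_cases hhit : pvHedgesB.any (fun h => PySem.Chars.startswith (c :: t) h.toList) = true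
      · rw [if_pos hhit]
        rcases List.any_eq_true.mp hhit with ⟨h, hmem, hsw⟩
        have : pvHedgesB.any (fun h => PySem.Chars.isIn h.toList (c :: t)) = true :=
          List.any_eq_true.mpr ⟨h, hmem, by rw [pvIsIn_cons, hsw]; simp⟩
        simp [this]
      · rw [if_neg hhit, ih]
        have hall := List.any_eq_false.mp (Bool.not_eq_true _ ▸ hhit)
        have hx : pvHedgesB.any (fun h => PySem.Chars.isIn h.toList (c :: t))
            = pvHedgesB.any (fun h => PySem.Chars.isIn h.toList t) := by
          rw [Bool.eq_iff_iff]
          simp only [List.any_eq_true]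
          constructor
          · rintro ⟨h, hmem, hh⟩
            refine ⟨h, hmem, ?_⟩
            rw [pvIsIn_cons, Bool.eq_false_iff.mpr (hall h hmem)] at hh
            simpa using hh
          · rintro ⟨h, hmem, hh⟩
            refine ⟨h, hmem, ?_⟩
            rw [pvIsIn_cons, Bool.eq_false_iff.mpr (hall h hmem)]
            simpa using hh
        rw [hx]

-- ===== VERDICT (by name: the statement is the Claim_ definition above) =====
theorem needs_hedging_py_spec : Claim_equal_needs_hedging_py := by
  intro text _
  unfold Spec_needs_hedging_py needs_hedging_py needs_hedging_py_alt
  rw [pvScan_eq]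
  have hAB : pvHedgesB = pvHedgesA := rfl
  rw [hAB]
  refine congrArg (! ·) (List.any_congr rfl fun h => ?_)
  simp
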